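-- pv_equiv track=rewrite | github.com/DRoxi1987/Bingo | pouch.py | get_letter
-- ===== SOURCE A (Python) =====
-- def get_letter(ran):
--     list_check = [n for n in range(1, 76)]
--     if ran in list_check[0:15]:
--         return "B"
--     elif ran in list_check[15:30]:
--         return "I"
--     elif ran in list_check[30:45]:
--         return "N"
--     elif ran in list_check[45:60]:
--         return "G"
--     elif ran in list_check[60:75]:
--         return "O"
--     else:
--         return ""
-- ===== SOURCE B (Python) =====
-- _TABLE = {n: "BINGO"[(n - 1) // 15] for n in range(1, 76)}
--
--
-- def get_letter(ran):
--     return _TABLE.get(ran, "")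
-- ===== Notes on version B (the rewrite author's own statement) =====
-- stated objective: simpler
-- what changed: Replaces the five-way if/elif membership chain over list slices by a dict built once (number -> column letter) and a single table.get lookup.
import Mathlib
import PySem

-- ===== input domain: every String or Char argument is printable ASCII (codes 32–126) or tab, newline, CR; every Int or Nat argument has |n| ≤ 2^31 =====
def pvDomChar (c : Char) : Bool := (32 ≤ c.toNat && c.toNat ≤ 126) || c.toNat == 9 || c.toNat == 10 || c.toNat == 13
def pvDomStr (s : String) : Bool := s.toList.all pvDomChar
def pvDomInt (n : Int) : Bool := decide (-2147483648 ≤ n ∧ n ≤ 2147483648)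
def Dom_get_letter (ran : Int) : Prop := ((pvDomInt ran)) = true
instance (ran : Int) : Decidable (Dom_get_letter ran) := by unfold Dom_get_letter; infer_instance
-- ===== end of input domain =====

set_option maxRecDepth 100000

-- B replaces A's five-way if/elif membership chain over list slices by a lookup table
-- (number -> column letter) built once, queried with dict.get; objective: simpler.

-- ===== PORT A =====
def get_letter (ran : Int) : String :=
  let list_check := PySem.List.pyRange 1 76 1
  if ran ∈ PySem.List.slice list_check (some 0) (some 15) then "B"
  else if ran ∈ PySem.List.slice list_check (some 15) (some 30) then "I"
  else if ran ∈ PySem.List.slice list_check (some 30) (some 45) then "N"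
  else if ran ∈ PySem.List.slice list_check (some 45) (some 60) then "G"
  else if ran ∈ PySem.List.slice list_check (some 60) (some 75) then "O"
  else ""

-- ===== PORT B =====
-- _TABLE = {n: "BINGO"[(n - 1) // 15] for n in range(1, 76)}
-- (Python's 1-char string "BINGO"[i] is the Char PySem.Str.pyGet? returns, wrapped back
--  into a String; the none branch is unreachable for n in range(1, 76).)
def bingoTable : PySem.Dict Int String :=
  (PySem.List.pyRange 1 76 1).foldl
    (fun d n => d.insert n (((PySem.Str.pyGet? "BINGO" (PySem.Int.floordiv (n - 1) 15)).map
      (fun c => String.ofList [c])).getD ""))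
    PySem.Dict.empty

def get_letter_alt (ran : Int) : String := bingoTable.getD ran ""

-- ===== PRECONDITION & SPEC =====
def Spec_get_letter (ran : Int) (out : String) : Prop := out = get_letter_alt ran
instance (ran : Int) (out : String) : Decidable (Spec_get_letter ran out) := by unfold Spec_get_letter; infer_instance

-- ===== CLAIM (what is proved, stated in full; the proofs are below) =====
def Claim_equal_get_letter : Prop := ∀ (ran : Int), Dom_get_letter ran → Spec_get_letter ran (get_letter ran)

-- ===== LEMMAS AND PROOFS =====

theorem get_letter_out_of_range (ran : Int) (h : ran < 1 ∨ 75 < ran) :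
    get_letter ran = "" := by
  simp only [get_letter]
  split_ifs with h1 h2 h3 h4 h5 <;>
    first
      | rfl
      | · exfalso
          first
            | have := PySem.List.mem_pyRange_one.mp (PySem.List.mem_of_mem_slice _ _ _ h1)
            | have := PySem.List.mem_pyRange_one.mp (PySem.List.mem_of_mem_slice _ _ _ h2)
            | have := PySem.List.mem_pyRange_one.mp (PySem.List.mem_of_mem_slice _ _ _ h3)
            | have := PySem.List.mem_pyRange_one.mp (PySem.List.mem_of_mem_slice _ _ _ h4)
            | have := PySem.List.mem_pyRange_one.mp (PySem.List.mem_of_mem_slice _ _ _ h5)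
          omega

theorem get_letter_alt_out_of_range (ran : Int) (h : ran < 1 ∨ 75 < ran) :
    get_letter_alt ran = "" := by
  have hns : ran ∉ bingoTable.keys := by
    rw [show bingoTable.keys
        = PySem.Set.update PySem.Dict.empty.keys (PySem.List.pyRange 1 76 1) from
      PySem.Dict.keys_foldl_insert _ _ _]
    intro hm
    rcases (PySem.Set.mem_update _ _ _).mp hm with hm | hm
    · simp [PySem.Dict.keys_empty] at hm
    · have := PySem.List.mem_pyRange_one.mp hm
      omega
  rw [get_letter_alt, PySem.Dict.getD_eq_get?_getD,
    (PySem.Dict.get?_eq_none_iff_not_mem_keys _ _).mpr hns]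
  rfl

-- ===== VERDICT (by name: the statement is the Claim_ definition above) =====
theorem get_letter_spec : Claim_equal_get_letter := by
  intro ran _
  unfold Spec_get_letter
  by_cases h1 : 1 ≤ ran
  · by_cases h2 : ran ≤ 75
    · interval_cases ran <;> decide
    · rw [get_letter_out_of_range ran (by omega), get_letter_alt_out_of_range ran (by omega)]
  · rw [get_letter_out_of_range ran (by omega), get_letter_alt_out_of_range ran (by omega)]
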